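-- pv_equiv track=rewrite | github.com/emilschleder/DaMorph | _1_MorfessorModel/_2_Evaluate/evaluate.py | generate_spans
-- ===== SOURCE A (Python) =====
-- def generate_spans(morphemes):
--     spans_set = set()
--     start = 0
--     for morpheme in morphemes:
--         stop = start + len(morpheme)
--         spans_set.add((start, stop))
--         start = stop
--     return spans_set
-- ===== SOURCE B (Python) =====
-- def generate_spans(morphemes):
--     if not morphemes:
--         return set()
--     if len(morphemes) == 1:
--         return {(0, len(morphemes[0]))}
--     mid = len(morphemes) // 2
--     left = generate_spans(morphemes[:mid])
--     offset = sum(len(m) for m in morphemes[:mid])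
--     right = generate_spans(morphemes[mid:])
--     return left | {(start + offset, stop + offset) for (start, stop) in right}
-- ===== Notes on version B (the rewrite author's own statement) =====
-- stated objective: alternative
-- what changed: Replaces the left-to-right running-start accumulator loop with a divide-and-conquer recursion: the span sets of the two halves are computed recursively and the right half's spans are shifted by the left half's total length before taking the union.
import Mathlib
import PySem

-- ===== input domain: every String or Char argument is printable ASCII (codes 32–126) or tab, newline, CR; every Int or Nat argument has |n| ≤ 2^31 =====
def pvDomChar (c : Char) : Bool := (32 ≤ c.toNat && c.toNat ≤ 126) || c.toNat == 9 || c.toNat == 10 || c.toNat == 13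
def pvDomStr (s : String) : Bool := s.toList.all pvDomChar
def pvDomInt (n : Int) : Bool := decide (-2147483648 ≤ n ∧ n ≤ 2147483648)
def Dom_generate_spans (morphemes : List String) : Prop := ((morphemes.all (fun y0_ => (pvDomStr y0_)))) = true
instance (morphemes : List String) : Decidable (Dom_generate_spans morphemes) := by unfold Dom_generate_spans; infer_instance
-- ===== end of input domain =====

-- B replaces A's left-to-right accumulator loop by divide-and-conquer: spans of each half computed recursively, right half's spans shifted by the left half's total length (alternative algorithm, same result).


-- ===== PORT A =====
def generate_spans (morphemes : List String) : List (Int × Int) :=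
  (morphemes.foldl
    (fun st m =>
      let stop := st.2 + PySem.Str.len m
      (PySem.Set.add st.1 (st.2, stop), stop))
    ((PySem.Set.empty : PySem.Set (Int × Int)), (0 : Int))).1

-- ===== PORT B =====
-- The mid bounds used by the recursion's termination proof (cited in decreasing_by).
theorem pv_mid_bounds (n : Nat) (h : 2 ≤ n) :
    1 ≤ PySem.Int.floordiv (n : Int) 2 ∧ PySem.Int.floordiv (n : Int) 2 ≤ (n : Int) - 1 := by
  show 1 ≤ Int.fdiv (n : Int) 2 ∧ Int.fdiv (n : Int) 2 ≤ (n : Int) - 1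
  rw [Int.fdiv_eq_ediv_of_nonneg _ (by omega)]
  omega

def generate_spans_alt (morphemes : List String) : List (Int × Int) :=
  if morphemes = [] then PySem.Set.empty
  else if morphemes.length = 1 then
    PySem.Set.add PySem.Set.empty ((0 : Int), PySem.Str.len (PySem.List.pyGetD morphemes 0 ""))
  else
    let mid : Int := PySem.Int.floordiv ((morphemes.length : Int)) 2
    let leftL := PySem.List.slice morphemes none (some mid)
    let rightL := PySem.List.slice morphemes (some mid) none
    let left := generate_spans_alt leftL
    let offset := (leftL.map PySem.Str.len).sum
    let right := generate_spans_alt rightL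
    PySem.Set.union left
      (PySem.Set.ofList (right.map (fun p => (p.1 + offset, p.2 + offset))))
termination_by morphemes.length
decreasing_by
  · rename_i h0 h1
    have h2 : 2 ≤ morphemes.length := by
      rcases morphemes with _ | ⟨a, t⟩
      · exact absurd rfl h0
      · simp only [List.length_cons] at h1 ⊢; omega
    obtain ⟨hge1, hle⟩ := pv_mid_bounds morphemes.length h2
    rw [PySem.List.slice_to morphemes (by omega)]
    simp only [List.length_take]
    omega
  · rename_i h0 h1
    have h2 : 2 ≤ morphemes.length := by
      rcases morphemes with _ | ⟨a, t⟩
      · exact absurd rfl h0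
      · simp only [List.length_cons] at h1 ⊢; omega
    obtain ⟨hge1, hle⟩ := pv_mid_bounds morphemes.length h2
    rw [PySem.List.slice_from morphemes (by omega)]
    simp only [List.length_drop]
    omega

-- ===== PRECONDITION & SPEC =====
def Spec_generate_spans (morphemes : List String) (out : List (Int × Int)) : Prop := out = generate_spans_alt morphemes
instance (morphemes : List String) (out : List (Int × Int)) : Decidable (Spec_generate_spans morphemes out) := by unfold Spec_generate_spans; infer_instance

-- ===== CLAIM =====
def Claim_equal_generate_spans : Prop := ∀ (morphemes : List String), Dom_generate_spans morphemes → Spec_generate_spans morphemes (generate_spans morphemes)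

-- ===== LEMMAS AND PROOFS =====

/-- The sequence of spans A's loop visits, as a pure list. -/
def pvSpansFrom (start : Int) : List String → List (Int × Int)
  | [] => []
  | m :: t => (start, start + PySem.Str.len m) :: pvSpansFrom (start + PySem.Str.len m) t

theorem pvA_loop (ms : List String) (s : PySem.Set (Int × Int)) (start : Int) :
    (ms.foldl (fun st m =>
        let stop := st.2 + PySem.Str.len m
        (PySem.Set.add st.1 (st.2, stop), stop)) (s, start)).1
      = List.foldl PySem.Set.add s (pvSpansFrom start ms) := by
  induction ms generalizing s start with
  | nil => rfl
  | cons m t ih =>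
    simp only [List.foldl_cons, pvSpansFrom]
    exact ih _ _

theorem pvSpansFrom_shift (ms : List String) (s off : Int) :
    pvSpansFrom (s + off) ms
      = (pvSpansFrom s ms).map (fun p => (p.1 + off, p.2 + off)) := by
  induction ms generalizing s with
  | nil => rfl
  | cons m t ih =>
    simp only [pvSpansFrom, List.map_cons, List.cons.injEq]
    refine ⟨by rw [Prod.mk.injEq]; exact ⟨rfl, by ring⟩, ?_⟩
    have : s + off + PySem.Str.len m = s + PySem.Str.len m + off := by ring
    rw [this, ih]

theorem pvSpansFrom_append (xs ys : List String) (s : Int) :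
    pvSpansFrom s (xs ++ ys)
      = pvSpansFrom s xs ++ pvSpansFrom (s + (xs.map PySem.Str.len).sum) ys := by
  induction xs generalizing s with
  | nil => simp [pvSpansFrom]
  | cons m t ih =>
    simp only [List.cons_append, pvSpansFrom, List.map_cons, List.sum_cons, List.cons.injEq,
      true_and]
    rw [ih]
    congr 2
    ring

theorem pvMap_add {α β : Type} [BEq α] [LawfulBEq α] [BEq β] [LawfulBEq β] (f : α → β)
    (hf : Function.Injective f) (s : PySem.Set α) (x : α) :
    (PySem.Set.add s x).map f = PySem.Set.add (s.map f) (f x) := by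
  rw [PySem.Set.add_eq_ite, PySem.Set.add_eq_ite]
  by_cases h : x ∈ s
  · simp [h, List.mem_map.mpr ⟨x, h, rfl⟩]
  · have : f x ∉ s.map f := by
      intro hc
      obtain ⟨y, hy, he⟩ := List.mem_map.mp hc
      exact h (hf he ▸ hy)
    simp [h, this]

theorem pvMap_foldl_add {α β : Type} [BEq α] [LawfulBEq α] [BEq β] [LawfulBEq β] (f : α → β)
    (hf : Function.Injective f) (l : List α) (s : PySem.Set α) :
    (l.foldl PySem.Set.add s).map f = (l.map f).foldl PySem.Set.add (s.map f) := by
  induction l generalizing s with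
  | nil => rfl
  | cons x t ih => simp only [List.foldl_cons, List.map_cons, ih, pvMap_add f hf]

theorem pvMap_ofList {α β : Type} [BEq α] [LawfulBEq α] [BEq β] [LawfulBEq β] (f : α → β)
    (hf : Function.Injective f) (l : List α) :
    (PySem.Set.ofList l).map f = PySem.Set.ofList (l.map f) := by
  rw [PySem.Set.ofList_eq_foldl, PySem.Set.ofList_eq_foldl, pvMap_foldl_add f hf]
  rfl

theorem pvUpdate_ofList {α : Type} [BEq α] [LawfulBEq α] (s : PySem.Set α) (l : List α) :
    PySem.Set.update s (PySem.Set.ofList l) = PySem.Set.update s l := by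
  rw [PySem.Set.update_eq_append_filter, PySem.Set.update_eq_append_filter,
    PySem.Set.ofList_ofList]

theorem pvShift_inj (off : Int) :
    Function.Injective (fun p : Int × Int => (p.1 + off, p.2 + off)) := by
  intro a b h
  simp only [Prod.mk.injEq] at h
  exact Prod.ext (by omega) (by omega)

/-- B's divide-and-conquer produces exactly the deduplicated list of A's span sequence. -/
theorem pvAlt_eq (ms : List String) :
    generate_spans_alt ms = PySem.Set.ofList (pvSpansFrom 0 ms) := by
  induction hn : ms.length using Nat.strong_induction_on generalizing ms with
  | _ n ih =>
  rw [generate_spans_alt]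
  by_cases h0 : ms = []
  · subst h0; rfl
  · rw [if_neg h0]
    by_cases h1 : ms.length = 1
    · rw [if_pos h1]
      obtain ⟨m, hm⟩ : ∃ m, ms = [m] := by
        rcases ms with _ | ⟨a, _ | _⟩ <;> simp_all
      subst hm
      simp [pvSpansFrom, PySem.Set.ofList, PySem.Set.add, PySem.List.pyGetD,
        PySem.List.pyGet?, PySem.List.pyIdx?]
    · rw [if_neg h1]
      dsimp only
      have h2 : 2 ≤ ms.length := by
        rcases ms with _ | ⟨a, t⟩
        · exact absurd rfl h0
        · simp only [List.length_cons] at h1 ⊢; omega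
      obtain ⟨hge1, hle⟩ := pv_mid_bounds ms.length h2
      have hnn : (0:Int) ≤ PySem.Int.floordiv ((ms.length : Int)) 2 := by omega
      rw [PySem.List.slice_to ms hnn, PySem.List.slice_from ms hnn]
      have hfd : (PySem.Int.floordiv ((ms.length : Int)) 2).toNat ≤ ms.length - 1 := by omega
      have hfd1 : 1 ≤ (PySem.Int.floordiv ((ms.length : Int)) 2).toNat := by omega
      set k : Nat := (PySem.Int.floordiv ((ms.length : Int)) 2).toNat with hk
      clear_value k
      have hltL : (ms.take k).length < n := by
        simp only [List.length_take]; omega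
      have hltR : (ms.drop k).length < n := by
        simp only [List.length_drop]; omega
      rw [ih _ hltL _ rfl, ih _ hltR _ rfl]
      rw [pvMap_ofList (fun p : Int × Int =>
            (p.1 + (List.map PySem.Str.len (List.take k ms)).sum,
             p.2 + (List.map PySem.Str.len (List.take k ms)).sum))
          (pvShift_inj _) (pvSpansFrom 0 (List.drop k ms))]
      have hsplit : ms = ms.take k ++ ms.drop k := (List.take_append_drop _ _).symm
      conv_rhs => rw [hsplit]
      rw [pvSpansFrom_append, PySem.Set.ofList_append, zero_add,
        ← zero_add ((List.map PySem.Str.len (ms.take k)).sum)]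
      rw [pvSpansFrom_shift]
      show PySem.Set.update _ (PySem.Set.ofList _) = _
      rw [pvUpdate_ofList]
      simp only [zero_add]
      rw [pvUpdate_ofList]

-- ===== VERDICT =====
theorem generate_spans_spec : Claim_equal_generate_spans := by
  intro ms _
  show generate_spans ms = generate_spans_alt ms
  unfold generate_spans
  rw [pvA_loop, pvAlt_eq]
  rfl
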